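-- pv_equiv track=rewrite | github.com/y2sec/Algorithm | TopCoder/SRM480D2.py | solution
-- ===== SOURCE A (Python) =====
-- def solution(numbers):
--     result = 0
--
--     for i in range(len(numbers)):
--         numbers[i] += 1
--         cnt = 1
--         for number in numbers:
--             cnt *= number
--         numbers[i] -= 1
--
--         result = max(result, cnt)
--
--     return result
-- ===== SOURCE B (Python) =====
-- def solution(numbers):
--     # One forward pass with precomputed suffix products (O(n) vs A's O(n^2)).
--     n = len(numbers)
--     suf = [1] * n  # suf[i] = product of numbers[i+1:]
--     for i in range(n - 2, -1, -1):
--         suf[i] = suf[i + 1] * numbers[i + 1]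
--     best = 0
--     pre = 1
--     for i in range(n):
--         x = numbers[i]
--         best = max(best, pre * (x + 1) * suf[i])
--         pre *= x
--     return best
-- ===== Notes on version B (the rewrite author's own statement) =====
-- stated objective: faster
-- what changed: Replaced the O(n^2) re-multiplication of the whole list for every incremented position by a precomputed suffix-product array plus a running prefix product, giving each candidate product in O(1).
import Mathlib
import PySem

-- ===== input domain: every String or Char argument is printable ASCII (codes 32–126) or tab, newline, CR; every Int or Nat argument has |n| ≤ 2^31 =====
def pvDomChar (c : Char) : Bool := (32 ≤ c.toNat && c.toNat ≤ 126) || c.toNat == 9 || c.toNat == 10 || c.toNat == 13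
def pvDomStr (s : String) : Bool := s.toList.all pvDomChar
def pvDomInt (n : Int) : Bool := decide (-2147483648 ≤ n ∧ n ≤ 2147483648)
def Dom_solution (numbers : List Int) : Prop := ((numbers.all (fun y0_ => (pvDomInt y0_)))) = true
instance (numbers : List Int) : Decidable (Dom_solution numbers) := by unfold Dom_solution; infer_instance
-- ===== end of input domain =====

-- B replaces A's O(n^2) full re-multiplication per position by a suffix-product list
-- plus a running prefix product (O(n)); return values proved equal on all inputs.


-- ===== PORT A =====
-- for i in range(len(numbers)): bump numbers[i], multiply the whole list, restore, take max.
-- (The Python temporarily mutates `numbers` but always restores it; net effect is pure.)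
def solution (numbers : List Int) : Int :=
  (PySem.List.pyRange 0 numbers.length 1).foldl
    (fun result i =>
      let bumped := numbers.set i.toNat (PySem.List.pyGetD numbers i 0 + 1)
      let cnt := bumped.foldl (fun c number => c * number) 1
      max result cnt)
    0

-- ===== PORT B =====
-- suffix-product list: (sufAux xs).1 !i = product of xs[i+1:], (sufAux xs).2 = product of xs
def sufAux : List Int → List Int × Int
  | [] => ([], 1)
  | x :: xs =>
    let r := sufAux xs
    (r.2 :: r.1, x * r.2)

-- forward pass of Source B: running prefix product `pre`, best-so-far `best`
def mainLoop : List Int → List Int → Int → Int → Int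
  | x :: xs, s :: ss, pre, best => mainLoop xs ss (pre * x) (max best (pre * (x + 1) * s))
  | _, _, _, best => best

def solution_alt (numbers : List Int) : Int :=
  mainLoop numbers (sufAux numbers).1 1 0

-- ===== PRECONDITION & SPEC =====
def Spec_solution (numbers : List Int) (out : Int) : Prop := out = solution_alt numbers
instance (numbers : List Int) (out : Int) : Decidable (Spec_solution numbers out) := by unfold Spec_solution; infer_instance

-- ===== CLAIM (what is proved, stated in full; the proofs are below) =====
def Claim_equal_solution : Prop := ∀ (numbers : List Int), Dom_solution numbers → Spec_solution numbers (solution numbers)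

-- ===== LEMMAS AND PROOFS =====

-- product of a list, and the candidate products both programs maximise over
def pvProd (xs : List Int) : Int := xs.foldl (fun c n => c * n) 1

def pvCands (xs : List Int) : List Int :=
  (List.range xs.length).map (fun i => pvProd (xs.set i (xs.getD i 0 + 1)))

theorem pvFoldl_mul (l : List Int) : ∀ a, l.foldl (fun c n => c * n) a = a * pvProd l := by
  induction l with
  | nil => intro a; simp [pvProd]
  | cons x t ih =>
    intro a
    simp only [List.foldl_cons]
    rw [ih]
    conv_rhs => rw [pvProd]
    simp only [List.foldl_cons]
    rw [ih]
    ring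

theorem pvProd_cons (x : Int) (t : List Int) : pvProd (x :: t) = x * pvProd t := by
  rw [pvProd]
  simp only [List.foldl_cons]
  rw [pvFoldl_mul]
  ring

theorem sufAux_snd (xs : List Int) : (sufAux xs).2 = pvProd xs := by
  induction xs with
  | nil => simp [sufAux, pvProd]
  | cons x t ih => simp [sufAux, ih, pvProd_cons]

theorem pvCands_cons (x : Int) (t : List Int) :
    pvCands (x :: t) = ((x + 1) * pvProd t) :: (pvCands t).map (fun c => x * c) := by
  simp only [pvCands, List.length_cons, List.range_succ_eq_map, List.map_cons, List.map_map]
  congr 1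
  · simp [pvProd_cons]
  · apply List.map_congr_left
    intro i _
    simp [Function.comp, pvProd_cons]

theorem mainLoop_eq (xs : List Int) : ∀ pre best,
    mainLoop xs (sufAux xs).1 pre best =
      (pvCands xs).foldl (fun b c => max b (pre * c)) best := by
  induction xs with
  | nil => intro pre best; simp [mainLoop, pvCands]
  | cons x t ih =>
    intro pre best
    simp only [sufAux, mainLoop, pvCands_cons, List.foldl_cons, List.foldl_map, sufAux_snd]
    rw [ih]
    congr 1
    · funext b c; ring_nf
    · congr 1; ring

theorem solution_alt_eq (xs : List Int) :
    solution_alt xs = (pvCands xs).foldl (fun b c => max b c) 0 := by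
  rw [solution_alt, mainLoop_eq]
  simp

theorem solution_eq (xs : List Int) :
    solution xs = (pvCands xs).foldl (fun b c => max b c) 0 := by
  simp only [solution, pvCands, List.foldl_map]
  rw [PySem.List.pyRange_one]
  simp only [List.foldl_map, Int.sub_zero, Int.toNat_natCast]
  apply PySem.List.foldl_congr_mem
  intro b i hi
  have hi' : i < xs.length := List.mem_range.mp hi
  have hz : ((0:Int) + (i:Int)) = (i:Int) := by ring
  rw [hz]
  simp [PySem.List.pyGetD_natCast, pvProd]

-- ===== VERDICT (by name: the statement is the Claim_ definition above) =====
theorem solution_spec : Claim_equal_solution := by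
  intro numbers _
  unfold Spec_solution
  rw [solution_eq, solution_alt_eq]
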